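-- pv_equiv track=rewrite | github.com/tianjiansmile/Risk_Score_Model | com/data_deal/SignalVariable.py | compute_score
-- ===== SOURCE A (Python) =====
-- def compute_score(series,cut,score):
--     list = []
--     i = 0
--     while i < len(series):
--         value = series[i]
--         j = len(cut) - 2
--         m = len(cut) - 2
--         while j >= 0:
--             if value >= cut[j]:
--                 j = -1
--             else:
--                 j -= 1
--                 m -= 1
--         list.append(score[m])
--         i += 1
--     return list
-- ===== SOURCE B (Python) =====
-- def compute_score(series, cut, score):
--     # sufmin[j] = min(cut[:-1][j:]); it is nondecreasing, and the largest j with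
--     # cut[j] <= v equals the largest j with sufmin[j] <= v, so a binary search
--     # (bisect_right by hand) finds A's bucket in O(log k) per value.
--     sufmin = []
--     m = None
--     for x in reversed(cut[:-1]):
--         if m is None or x < m:
--             m = x
--         sufmin.append(m)
--     sufmin.reverse()
--     k = len(sufmin)
--     def upper(value):
--         lo, hi = 0, k
--         while lo < hi:
--             mid = (lo + hi) // 2
--             if sufmin[mid] <= value:
--                 lo = mid + 1
--             else:
--                 hi = mid
--         return lo
--     return [score[upper(v) - 1] for v in series]
-- ===== Notes on version B (the rewrite author's own statement) =====
-- stated objective: faster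
-- what changed: A's per-value downward linear scan over the cut thresholds is replaced by a precomputed suffix-minima array over cut[:-1] plus a hand-written bisect_right binary search per value, turning O(n*k) into O(k + n log k).
-- intended difference: On empty cut with nonempty series, A returns score[-2] for every value (leftover loop-counter state, off by one), while B returns score[-1], the same no-threshold bucket A itself uses when len(cut)=1; D_ additionally requires those two score entries to differ. — e.g. on compute_score([0], [], [10, 20]): A returns [10], B returns [20]
import Mathlib
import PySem

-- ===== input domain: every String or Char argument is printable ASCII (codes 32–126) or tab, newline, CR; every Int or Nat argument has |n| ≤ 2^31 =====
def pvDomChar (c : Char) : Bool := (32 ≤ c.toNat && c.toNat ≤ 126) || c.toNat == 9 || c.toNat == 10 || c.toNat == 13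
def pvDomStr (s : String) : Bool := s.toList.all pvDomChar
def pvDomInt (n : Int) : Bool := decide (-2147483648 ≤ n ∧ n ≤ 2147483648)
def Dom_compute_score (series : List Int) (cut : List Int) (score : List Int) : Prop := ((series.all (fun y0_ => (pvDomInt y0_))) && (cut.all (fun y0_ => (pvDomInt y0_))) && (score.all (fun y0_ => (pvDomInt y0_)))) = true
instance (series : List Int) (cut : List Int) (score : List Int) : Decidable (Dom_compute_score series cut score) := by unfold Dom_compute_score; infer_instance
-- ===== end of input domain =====

-- B replaces A's per-value downward linear scan of the cut thresholds by a suffix-minima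
-- array over cut[:-1] plus a binary search (bisect_right by hand) per value.

-- ===== PORT A =====
-- A's inner `while j >= 0` loop; m tracks the surviving index. cut[j] is read with
-- pyGetD (default 0): in A's execution 0 ≤ j ≤ len(cut)-2, so the read is always in range.
-- The Nat fuel only makes the recursion structural; callers pass fuel ≥ j+1, so it never
-- runs out before the loop's own exit test.
def csLoopA (value : Int) (cut : List Int) : Nat → Int → Int → Int
  | 0, _, m => m
  | fuel + 1, j, m =>
    if 0 ≤ j then
      if value ≥ PySem.List.pyGetD cut j 0 then m        -- j = -1 exits the loop, m kept
      else csLoopA value cut fuel (j - 1) (m - 1)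
    else m

-- A's outer `while i < len(series)` loop, appending score[m]; score[m] is read with
-- pyGetD (default 0): Python raises IndexError out of range, which Pre_ excludes.
def compute_score (series : List Int) (cut : List Int) (score : List Int) : List Int :=
  match series with
  | [] => []
  | v :: rest =>
      PySem.List.pyGetD score
        (csLoopA v cut cut.length ((cut.length : Int) - 2) ((cut.length : Int) - 2)) 0
        :: compute_score rest cut score

-- ===== PORT B =====
-- B's suffix-minima loop over reversed(cut[:-1]), running minimum m (None before the first
-- element). The Python appends each m and reverses at the end; the accumulator here is that
-- append-order list kept reversed, so consing onto it gives the final reversed list directly.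
def csSufLoop : List Int → Option Int → List Int → List Int
  | [], _, acc => acc
  | x :: ts, m?, acc =>
    let m := match m? with
      | none => x
      | some m0 => if x < m0 then x else m0
    csSufLoop ts (some m) (m :: acc)

-- B's `upper` helper: bisect_right of value in sufmin, by binary search on [lo, hi).
-- Structural Nat fuel; the wrapper passes fuel = hi - lo, which each halving step preserves
-- as an upper bound, so the fuel never runs out before lo = hi.
def csUpperF (sufmin : List Int) (value : Int) : Nat → Nat → Nat → Nat
  | 0, lo, _ => lo
  | fuel + 1, lo, hi =>
    if lo < hi then
      -- mid = (lo + hi) // 2, inlined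
      if PySem.List.pyGetD sufmin (((lo + hi) / 2 : Nat) : Int) 0 ≤ value then
        csUpperF sufmin value fuel ((lo + hi) / 2 + 1) hi
      else csUpperF sufmin value fuel lo ((lo + hi) / 2)
    else lo

def csUpper (sufmin : List Int) (value : Int) (lo hi : Nat) : Nat :=
  csUpperF sufmin value (hi - lo) lo hi

-- B: sufmin = suffix_mins(cut[:-1]); result = [score[upper(v) - 1] for v in series].
def compute_score_alt (series : List Int) (cut : List Int) (score : List Int) : List Int :=
  let sufmin := csSufLoop (PySem.List.slice cut none (some (-1))).reverse none []
  let k := sufmin.length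
  series.map (fun v => PySem.List.pyGetD score ((csUpper sufmin v 0 k : Int) - 1) 0)

-- ===== PRECONDITION & SPEC =====
-- Pre_ is exactly where Python A returns instead of raising IndexError on score[m]:
-- every threshold index j that some value matches (cut[j] ≤ v, j < len(cut)-1) must lie
-- inside score, score must be nonempty for the no-match bucket score[-1], and an empty cut
-- needs len(score) ≥ 2 because A then reads score[-2].
def Pre_compute_score (series : List Int) (cut : List Int) (score : List Int) : Prop :=
  (series ≠ [] → 1 ≤ score.length ∧ (cut = [] → 2 ≤ score.length)) ∧
  (∀ v ∈ series, ∀ j < cut.length - 1, cut.getD j 0 ≤ v → j < score.length)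

instance (series : List Int) (cut : List Int) (score : List Int) : Decidable (Pre_compute_score series cut score) := by
  unfold Pre_compute_score; infer_instance

def pvWitness_compute_score : List Int × List Int × List Int := ([1, 7], [0, 5], [10])

-- On empty cut with nonempty series, A returns score[-2] for every value (leftover
-- loop-counter state, off by one), while B returns score[-1], the same no-threshold bucket
-- A itself uses when len(cut) = 1; D_ additionally requires those two score entries to differ.
def D_compute_score (series : List Int) (cut : List Int) (score : List Int) : Prop :=
  cut = [] ∧ series ≠ [] ∧ PySem.List.pyGetD score (-2) 0 ≠ PySem.List.pyGetD score (-1) 0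

instance (series : List Int) (cut : List Int) (score : List Int) : Decidable (D_compute_score series cut score) := by
  unfold D_compute_score; infer_instance

def Spec_compute_score (series : List Int) (cut : List Int) (score : List Int) (out : List Int) : Prop :=
  ¬ D_compute_score series cut score → out = compute_score_alt series cut score

instance (series : List Int) (cut : List Int) (score : List Int) (out : List Int) : Decidable (Spec_compute_score series cut score out) := by
  unfold Spec_compute_score; infer_instance

def pvDiffWitness_compute_score : List Int × List Int × List Int := ([0], [], [10, 20])
def pvDiffWitnessOut_compute_score : (List Int) × (List Int) := ([10], [20])

-- ===== CLAIM (what is proved, stated in full; the proofs are below) =====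
def Claim_unchanged_compute_score : Prop := ∀ (series : List Int) (cut : List Int) (score : List Int), Dom_compute_score series cut score → Pre_compute_score series cut score → Spec_compute_score series cut score (compute_score series cut score)
def Claim_changed_compute_score : Prop := Dom_compute_score (pvDiffWitness_compute_score.1) (pvDiffWitness_compute_score.2.1) (pvDiffWitness_compute_score.2.2) ∧ Pre_compute_score (pvDiffWitness_compute_score.1) (pvDiffWitness_compute_score.2.1) (pvDiffWitness_compute_score.2.2) ∧ D_compute_score (pvDiffWitness_compute_score.1) (pvDiffWitness_compute_score.2.1) (pvDiffWitness_compute_score.2.2) ∧ compute_score (pvDiffWitness_compute_score.1) (pvDiffWitness_compute_score.2.1) (pvDiffWitness_compute_score.2.2) = pvDiffWitnessOut_compute_score.1 ∧ compute_score_alt (pvDiffWitness_compute_score.1) (pvDiffWitness_compute_score.2.1) (pvDiffWitness_compute_score.2.2) = pvDiffWitnessOut_compute_score.2 ∧ pvDiffWitnessOut_compute_score.1 ≠ pvDiffWitnessOut_compute_score.2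
def Claim_exact_compute_score : Prop := ∀ (series : List Int) (cut : List Int) (score : List Int), Dom_compute_score series cut score → Pre_compute_score series cut score → D_compute_score series cut score → compute_score series cut score ≠ compute_score_alt series cut score

-- ===== LEMMAS AND PROOFS =====

-- recursive specification of the suffix-minima list: csSufMin(ts)[j] = min(ts[j:])
def csSufMin : List Int → List Int
  | [] => []
  | x :: ts =>
    let rest := csSufMin ts
    (match rest with
     | [] => x
     | m0 :: _ => if x < m0 then x else m0) :: rest

-- the iterative loop of the port computes csSufMin
theorem csSufLoop_inv : ∀ (rest done : List Int),
    csSufLoop rest (csSufMin done).head? (csSufMin done) = csSufMin (rest.reverse ++ done) := by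
  intro rest
  induction rest with
  | nil => intro done; simp [csSufLoop]
  | cons x rest ih =>
    intro done
    have hstep : csSufLoop (x :: rest) (csSufMin done).head? (csSufMin done)
        = csSufLoop rest (csSufMin (x :: done)).head? (csSufMin (x :: done)) := by
      cases h : csSufMin done with
      | nil => simp [csSufLoop, csSufMin, h]
      | cons m0 r => simp [csSufLoop, csSufMin, h]
    rw [hstep, ih (x :: done)]
    simp

theorem csSufLoop_eq (ts : List Int) : csSufLoop ts.reverse none [] = csSufMin ts := by
  have h := csSufLoop_inv ts.reverse []
  simpa [csSufMin] using h

-- characterisation of the bucket index r against a list xs of n suffix minima: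
-- the indices whose entry is ≤ v are exactly those ≤ r
def csChar (v : Int) (xs : List Int) (n : Nat) (r : Int) : Prop :=
  -1 ≤ r ∧ r < (n : Int) ∧ ∀ i : Nat, i < n → (PySem.List.pyGetD xs (i : Int) 0 ≤ v ↔ (i : Int) ≤ r)

theorem csChar_unique {v : Int} {xs : List Int} {n : Nat} {r1 r2 : Int}
    (h1 : csChar v xs n r1) (h2 : csChar v xs n r2) : r1 = r2 := by
  obtain ⟨b1, t1, c1⟩ := h1
  obtain ⟨b2, t2, c2⟩ := h2
  by_contra hne
  rcases lt_trichotomy r1 r2 with h | h | h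
  · have hi : (r2.toNat : Int) = r2 := Int.toNat_of_nonneg (by omega)
    have := (c1 r2.toNat (by omega)).mp ((c2 r2.toNat (by omega)).mpr (by omega))
    omega
  · exact hne h
  · have hi : (r1.toNat : Int) = r1 := Int.toNat_of_nonneg (by omega)
    have := (c2 r1.toNat (by omega)).mp ((c1 r1.toNat (by omega)).mpr (by omega))
    omega

theorem csSufMin_length (ts : List Int) : (csSufMin ts).length = ts.length := by
  induction ts with
  | nil => rfl
  | cons x ts ih => simp [csSufMin, ih]

-- a suffix minimum is a lower bound for every later entry
theorem csSufMin_le (ts : List Int) :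
    ∀ i j : Nat, i ≤ j → j < ts.length → (csSufMin ts).getD i 0 ≤ ts.getD j 0 := by
  induction ts with
  | nil => intro i j _ hj; simp at hj
  | cons x ts ih =>
    intro i j hij hj
    match i, j with
    | 0, 0 =>
      simp only [csSufMin, List.getD_cons_zero]
      cases hr : csSufMin ts with
      | nil => simp
      | cons m0 r => simp only [hr]; split_ifs <;> omega
    | 0, j + 1 =>
      have hjl : j < ts.length := by simpa using hj
      have hts : ts ≠ [] := by intro h; rw [h] at hjl; simp at hjl
      have hrne : csSufMin ts ≠ [] := by
        intro h
        have := csSufMin_length ts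
        rw [h] at this
        exact hts (List.length_eq_zero_iff.mp this.symm)
      obtain ⟨m0, r, hr⟩ := List.exists_cons_of_ne_nil hrne
      have hhead : (csSufMin ts).getD 0 0 = m0 := by rw [hr]; rfl
      have h0 : (csSufMin ts).getD 0 0 ≤ ts.getD j 0 := ih 0 j (by omega) hjl
      simp only [csSufMin, List.getD_cons_zero, List.getD_cons_succ, hr]
      rw [hr, List.getD_cons_zero] at h0
      split_ifs <;> omega
    | i + 1, j + 1 =>
      simp only [csSufMin, List.getD_cons_succ]
      exact ih i j (by omega) (by simpa using hj)

-- each suffix minimum is attained at some later index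
theorem csSufMin_attained (ts : List Int) :
    ∀ i : Nat, i < ts.length → ∃ j : Nat, i ≤ j ∧ j < ts.length ∧ ts.getD j 0 = (csSufMin ts).getD i 0 := by
  induction ts with
  | nil => intro i hi; simp at hi
  | cons x ts ih =>
    intro i hi
    match i with
    | 0 =>
      cases hr : csSufMin ts with
      | nil =>
        exact ⟨0, le_refl _, by simpa using hi, by simp [csSufMin, hr]⟩
      | cons m0 r =>
        have hts : 0 < ts.length := by
          have := csSufMin_length ts
          rw [hr] at this
          simp at this
          omega
        by_cases hx : x < m0
        · exact ⟨0, le_refl _, by simpa using hi, by simp [csSufMin, hr, hx]⟩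
        · obtain ⟨j, _, hjl, hjv⟩ := ih 0 hts
          refine ⟨j + 1, by omega, by simpa using hjl, ?_⟩
          rw [hr, List.getD_cons_zero] at hjv
          simp [csSufMin, hr, hx]
          exact hjv
    | i + 1 =>
      obtain ⟨j, hij, hjl, hjv⟩ := ih i (by simpa using hi)
      refine ⟨j + 1, by omega, by simpa using hjl, ?_⟩
      simp [csSufMin]
      exact hjv

-- the suffix-minima list is nondecreasing
theorem csSufMin_sorted (ts : List Int) : (csSufMin ts).Pairwise (· ≤ ·) := by
  rw [List.pairwise_iff_getElem]
  intro i j hi hj hij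
  have hlen := csSufMin_length ts
  obtain ⟨j', hjj', hj'l, hj'v⟩ := csSufMin_attained ts j (by omega)
  have h1 : (csSufMin ts).getD i 0 ≤ ts.getD j' 0 := csSufMin_le ts i j' (by omega) hj'l
  rw [hj'v] at h1
  rw [List.getD_eq_getElem _ 0 hi, List.getD_eq_getElem _ 0 hj] at h1
  exact h1

theorem csSorted_getD {xs : List Int} (hs : xs.Pairwise (· ≤ ·)) (i k : Nat)
    (hik : i ≤ k) (hk : k < xs.length) : xs.getD i 0 ≤ xs.getD k 0 := by
  rw [List.getD_eq_getElem xs 0 (by omega), List.getD_eq_getElem xs 0 hk]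
  rcases Nat.lt_or_ge i k with h | h
  · exact (List.pairwise_iff_getElem.mp hs) i k (by omega) hk h
  · have : i = k := by omega
    subst this; exact le_refl _

-- dropLast and the full list agree on indices below its length
theorem csGetD_dropLast (cut : List Int) (i : Nat) (hi : i < cut.dropLast.length) :
    cut.dropLast.getD i 0 = cut.getD i 0 := by
  have h2 : i < cut.length := by simp [List.length_dropLast] at hi; omega
  rw [List.getD_eq_getElem _ 0 hi, List.getD_eq_getElem _ 0 h2]
  simp [List.getElem_dropLast]

-- below j (a matched threshold index), every suffix minimum is ≤ v
theorem csSmin_le_of_match (v : Int) (cut : List Int) (n : Nat) (hn : n + 1 = cut.length)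
    (j : Nat) (hjn : j < n) (hv : cut.getD j 0 ≤ v) :
    ∀ i : Nat, i ≤ j → (csSufMin cut.dropLast).getD i 0 ≤ v := by
  intro i hij
  have hlen : cut.dropLast.length = n := by rw [List.length_dropLast]; omega
  have h1 : (csSufMin cut.dropLast).getD i 0 ≤ cut.dropLast.getD j 0 :=
    csSufMin_le cut.dropLast i j hij (by omega)
  rw [csGetD_dropLast cut j (by omega)] at h1
  omega

-- above every matched index, every suffix minimum exceeds v
theorem csSmin_gt (v : Int) (cut : List Int) (n : Nat) (hn : n + 1 = cut.length) (j : Int)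
    (hinv : ∀ i : Nat, i < n → j < (i : Int) → ¬ (PySem.List.pyGetD cut (i : Int) 0 ≤ v)) :
    ∀ i : Nat, i < n → j < (i : Int) → ¬ ((csSufMin cut.dropLast).getD i 0 ≤ v) := by
  intro i hi hji hle
  have hlen : cut.dropLast.length = n := by rw [List.length_dropLast]; omega
  obtain ⟨j', hij', hj'l, hj'v⟩ := csSufMin_attained cut.dropLast i (by omega)
  have hpg : PySem.List.pyGetD cut ((j' : Nat) : Int) 0 = cut.getD j' 0 := by
    simp [PySem.List.pyGetD_natCast]
  apply hinv j' (by omega) (by omega)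
  rw [hpg, ← csGetD_dropLast cut j' (by omega), hj'v]
  exact hle

-- A's inner loop lands on the boundary index of the suffix-minima list
theorem csLoopA_char (v : Int) (cut : List Int) (n : Nat) (hn : n + 1 = cut.length) :
    ∀ (fuel : Nat) (j : Int), (j + 1).toNat ≤ fuel → -1 ≤ j → j < (n : Int) →
    (∀ i : Nat, i < n → j < (i : Int) → ¬ (PySem.List.pyGetD cut (i : Int) 0 ≤ v)) →
    csChar v (csSufMin cut.dropLast) n (csLoopA v cut fuel j j) := by
  intro fuel
  induction fuel with
  | zero =>
    intro j hf h0 h1 hinv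
    have hj : j = -1 := by omega
    subst hj
    simp only [csLoopA]
    refine ⟨by omega, h1, fun i hi => ?_⟩
    rw [PySem.List.pyGetD_natCast]
    constructor
    · intro hle
      exact absurd hle (csSmin_gt v cut n hn (-1) hinv i hi (by omega))
    · intro hle; omega
  | succ fuel ih =>
    intro j hf h0 h1 hinv
    simp only [csLoopA]
    split_ifs with hj hv
    · refine ⟨h0, h1, fun i hi => ?_⟩
      rw [PySem.List.pyGetD_natCast]
      constructor
      · intro hle
        by_contra hgt
        exact csSmin_gt v cut n hn j hinv i hi (by omega) hle
      · intro hle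
        have hgdj : PySem.List.pyGetD cut j 0 = cut.getD j.toNat 0 := by
          have hpg := PySem.List.pyGetD_natCast (xs := cut) (n := j.toNat) (d := 0)
          rwa [Int.toNat_of_nonneg hj] at hpg
        exact csSmin_le_of_match v cut n hn j.toNat (by omega) (by rw [← hgdj]; exact hv) i (by omega)
    · apply ih (j - 1) (by omega) (by omega) (by omega)
      intro i hi hgt
      rcases Int.lt_or_le j (i : Int) with h | h
      · exact hinv i hi h
      · have : (i : Int) = j := by omega
        intro hle
        apply hv
        rw [← this]
        exact hle
    · have hj : j = -1 := by omega
      subst hj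
      refine ⟨by omega, h1, fun i hi => ?_⟩
      rw [PySem.List.pyGetD_natCast]
      constructor
      · intro hle
        exact absurd hle (csSmin_gt v cut n hn (-1) hinv i hi (by omega))
      · intro hle; omega

-- B's binary search computes the same boundary index (shifted by one)
theorem csUpperF_char (v : Int) (sufmin : List Int) (hs : sufmin.Pairwise (· ≤ ·)) :
    ∀ (fuel lo hi : Nat), hi - lo ≤ fuel → lo ≤ hi → hi ≤ sufmin.length →
    (∀ i : Nat, i < lo → PySem.List.pyGetD sufmin (i : Int) 0 ≤ v) →
    (∀ i : Nat, hi ≤ i → i < sufmin.length → ¬ (PySem.List.pyGetD sufmin (i : Int) 0 ≤ v)) →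
    csChar v sufmin sufmin.length ((csUpperF sufmin v fuel lo hi : Int) - 1) := by
  intro fuel
  induction fuel with
  | zero =>
    intro lo hi hf hlh hhn hlow hhigh
    have hle : lo = hi := by omega
    simp only [csUpperF]
    refine ⟨(by omega), (by omega), fun i hi' => ?_⟩
    constructor
    · intro hvle
      by_contra hgt
      exact hhigh i (by omega) hi' hvle
    · intro hle'
      exact hlow i (by omega)
  | succ fuel ih =>
    intro lo hi hf hlh hhn hlow hhigh
    simp only [csUpperF]
    split_ifs with hlt hv
    · exact ih ((lo + hi) / 2 + 1) hi (by omega) (by omega) hhn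
        (fun i hi' => by
          rcases Nat.lt_or_ge i ((lo + hi) / 2) with h | h
          · have hm : (lo + hi) / 2 < sufmin.length := by omega
            have h1 : PySem.List.pyGetD sufmin (i : Int) 0 = sufmin.getD i 0 := by
              simp [PySem.List.pyGetD_natCast]
            have h2 : PySem.List.pyGetD sufmin (((lo + hi) / 2 : Nat) : Int) 0 = sufmin.getD ((lo + hi) / 2) 0 := by
              rw [PySem.List.pyGetD_natCast]
            have := csSorted_getD hs i ((lo + hi) / 2) (by omega) hm
            rw [h1]; rw [h2] at hv; omega
          · have : i = (lo + hi) / 2 := by omega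
            rw [this]; exact hv)
        hhigh
    · exact ih lo ((lo + hi) / 2) (by omega) (by omega) (by omega) hlow
        (fun i hge hi' => by
          have h1 : PySem.List.pyGetD sufmin (i : Int) 0 = sufmin.getD i 0 := by
            simp [PySem.List.pyGetD_natCast]
          have h2 : PySem.List.pyGetD sufmin (((lo + hi) / 2 : Nat) : Int) 0 = sufmin.getD ((lo + hi) / 2) 0 := by
            rw [PySem.List.pyGetD_natCast]
          have := csSorted_getD hs ((lo + hi) / 2) i hge hi'
          rw [h1]; rw [h2] at hv; omega)
    · have hle : lo = hi := by omega
      refine ⟨(by omega), (by omega), fun i hi' => ?_⟩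
      constructor
      · intro hvle
        by_contra hgt
        exact hhigh i (by omega) hi' hvle
      · intro hle'
        exact hlow i (by omega)

theorem csUpper_char (v : Int) (sufmin : List Int) (hs : sufmin.Pairwise (· ≤ ·)) :
    csChar v sufmin sufmin.length ((csUpper sufmin v 0 sufmin.length : Int) - 1) :=
  csUpperF_char v sufmin hs (sufmin.length - 0) 0 sufmin.length (le_refl _) (by omega) (le_refl _)
    (fun i hi => by omega) (fun i hge hi => by omega)

-- the key index equality: on nonempty cut, A's scan and B's binary search agree
theorem csIndex_eq (v : Int) (cut : List Int) (hne : cut ≠ []) :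
    csLoopA v cut cut.length ((cut.length : Int) - 2) ((cut.length : Int) - 2)
      = (csUpper (csSufMin cut.dropLast) v 0 (csSufMin cut.dropLast).length : Int) - 1 := by
  have hL : 1 ≤ cut.length := List.length_pos_iff.mpr hne
  have hlen : (csSufMin cut.dropLast).length = cut.length - 1 := by
    rw [csSufMin_length, List.length_dropLast]
  have hn : (cut.length - 1) + 1 = cut.length := by omega
  have hA : csChar v (csSufMin cut.dropLast) ((csSufMin cut.dropLast).length)
      (csLoopA v cut cut.length ((cut.length : Int) - 2) ((cut.length : Int) - 2)) := by
    apply csLoopA_char v cut ((csSufMin cut.dropLast).length) (by omega) cut.length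
      ((cut.length : Int) - 2) (by omega) (by omega) (by omega)
    intro i hi hgt
    omega
  have hB0 := csUpper_char v (csSufMin cut.dropLast) (csSufMin_sorted cut.dropLast)
  exact csChar_unique hA hB0

-- compute_score as a map (A's append loop builds exactly this list)
theorem compute_score_eq_map (series cut score : List Int) :
    compute_score series cut score
      = series.map (fun v => PySem.List.pyGetD score
          (csLoopA v cut cut.length ((cut.length : Int) - 2) ((cut.length : Int) - 2)) 0) := by
  induction series with
  | nil => rfl
  | cons v rest ih => simp [compute_score, ih]

theorem csLoopA_nil (v m : Int) : csLoopA v [] 0 (-2) m = m := rfl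

theorem csUpper_zero (sufmin : List Int) (v : Int) : csUpper sufmin v 0 0 = 0 := rfl

-- ===== VERDICT (by name: the statement is the Claim_ definition above) =====
theorem compute_score_spec : Claim_unchanged_compute_score := by
  intro series cut score _hdom hpre hnd
  rw [compute_score_eq_map]
  unfold compute_score_alt
  simp only [PySem.List.slice_to_neg_one]
  rw [csSufLoop_eq]
  rcases eq_or_ne cut [] with hc | hc
  · subst hc
    rcases eq_or_ne series [] with hsnil | hsnil
    · subst hsnil; rfl
    · have heq : PySem.List.pyGetD score (-2) 0 = PySem.List.pyGetD score (-1) 0 := by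
        by_contra hne
        exact hnd ⟨rfl, hsnil, hne⟩
      apply List.map_congr_left
      intro v _
      norm_num [csUpper_zero, csLoopA_nil, csSufMin]
      exact heq
  · apply List.map_congr_left
    intro v _
    rw [csIndex_eq v cut hc]

theorem compute_score_changed : Claim_changed_compute_score := by
  unfold Claim_changed_compute_score
  refine ⟨by decide, by unfold Pre_compute_score pvDiffWitness_compute_score; simp, ?_, ?_, ?_, by decide⟩
  · unfold D_compute_score pvDiffWitness_compute_score
    refine ⟨rfl, by simp, by decide⟩
  · show compute_score [0] [] [10, 20] = [10]
    rw [compute_score_eq_map]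
    simp only [List.map_cons, List.map_nil, List.length_nil, Nat.cast_zero]
    rw [show ((0:Int) - 2) = -2 by norm_num, csLoopA_nil]
    decide
  · show compute_score_alt [0] [] [10, 20] = [20]
    decide

theorem compute_score_tight : Claim_exact_compute_score := by
  intro series cut score _hdom hpre hd
  obtain ⟨hc, hsne, hdiff⟩ := hd
  subst hc
  obtain ⟨v, rest, rfl⟩ := List.exists_cons_of_ne_nil hsne
  rw [compute_score_eq_map]
  unfold compute_score_alt
  simp only [PySem.List.slice_to_neg_one, List.dropLast_nil, List.reverse_nil, List.map_cons]
  intro h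
  simp only [List.cons.injEq] at h
  obtain ⟨hh, -⟩ := h
  norm_num [csUpper_zero, csLoopA_nil, csSufLoop] at hh
  exact hdiff hh
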